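-- pv_equiv track=rewrite | github.com/yifan1207/PT-IT-Model-Differences | scripts/analysis/analyze_first_divergence_position_sensitivity.py | _step_bin
-- ===== SOURCE A (Python) =====
-- from typing import Any, Callable, Iterable
--
-- POSITION_BINS: tuple[tuple[str, Callable[[int], bool]], ...] = (
--     ("all", lambda step: True),
--     ("step_0", lambda step: step == 0),
--     ("step_1", lambda step: step == 1),
--     ("step_2_4", lambda step: 2 <= step <= 4),
--     ("step_1_4", lambda step: 1 <= step <= 4),
--     ("step_5_9", lambda step: 5 <= step <= 9),
--     ("step_5_plus", lambda step: step >= 5),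
--     ("step_10_plus", lambda step: step >= 10),
--     ("step_ge1", lambda step: step >= 1),
--     ("step_ge2", lambda step: step >= 2),
--     ("step_ge3", lambda step: step >= 3),
--     ("step_ge4", lambda step: step >= 4),
-- )
--
-- def _step_bin(step: int | None) -> str | None:
--     if step is None:
--         return None
--     for name, predicate in POSITION_BINS:
--         if name == "all":
--             continue
--         if predicate(step):
--             return name
--     return None
-- ===== SOURCE B (Python) =====
-- # B: clamp-and-index lookup table instead of a first-match predicate scan.
-- # Correct because the bins that can ever be returned partition {0,1,...}
-- # into contiguous ranges that stabilise from 10 on: indexing the table at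
-- # min(step, 10) yields exactly the first matching bin name; negatives and
-- # None match no bin.
-- _STEP_BIN_TABLE = (
--     "step_0",                                     # 0
--     "step_1",                                     # 1
--     "step_2_4", "step_2_4", "step_2_4",           # 2..4
--     "step_5_9", "step_5_9", "step_5_9", "step_5_9", "step_5_9",  # 5..9
--     "step_5_plus",                                # >= 10 (clamped)
-- )
--
-- def _step_bin(step):
--     if step is None or step < 0:
--         return None
--     return _STEP_BIN_TABLE[min(step, 10)]
-- ===== Notes on version B (the rewrite author's own statement) =====
-- stated objective: alternative
-- what changed: Replaces the sequential first-match scan over the POSITION_BINS predicate table with a clamped direct index into a precomputed label table: the answer is _STEP_BIN_TABLE[min(step,10)] (None for None/negative), so no predicates are evaluated and no scan happens.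
import Mathlib
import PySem

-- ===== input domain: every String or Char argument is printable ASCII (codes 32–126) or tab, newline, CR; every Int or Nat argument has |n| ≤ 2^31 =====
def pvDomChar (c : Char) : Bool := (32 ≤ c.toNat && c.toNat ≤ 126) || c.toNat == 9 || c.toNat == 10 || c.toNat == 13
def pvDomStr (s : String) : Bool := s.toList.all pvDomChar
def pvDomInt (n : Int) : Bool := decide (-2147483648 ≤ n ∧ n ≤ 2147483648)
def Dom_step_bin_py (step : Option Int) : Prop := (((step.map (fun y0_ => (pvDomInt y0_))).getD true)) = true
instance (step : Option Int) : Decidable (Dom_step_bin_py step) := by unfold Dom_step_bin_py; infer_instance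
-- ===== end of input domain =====

-- B replaces the first-match predicate scan by a clamped direct index into a label table (alternative O(1) lookup).

-- ===== PORT A =====
-- the module-level table POSITION_BINS, names paired with predicate closures
def positionBins : List (String × (Int → Bool)) :=
  [ ("all", fun _ => true),
    ("step_0", fun step => step == 0),
    ("step_1", fun step => step == 1),
    ("step_2_4", fun step => 2 ≤ step && step ≤ 4),
    ("step_1_4", fun step => 1 ≤ step && step ≤ 4),
    ("step_5_9", fun step => 5 ≤ step && step ≤ 9),
    ("step_5_plus", fun step => step ≥ 5),
    ("step_10_plus", fun step => step ≥ 10),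
    ("step_ge1", fun step => step ≥ 1),
    ("step_ge2", fun step => step ≥ 2),
    ("step_ge3", fun step => step ≥ 3),
    ("step_ge4", fun step => step ≥ 4) ]

-- the for-loop with early return, as structural recursion over the table
def stepBinLoop (step : Int) : List (String × (Int → Bool)) → Option String
  | [] => none
  | (name, predicate) :: rest =>
      if name == "all" then stepBinLoop step rest
      else if predicate step then some name
      else stepBinLoop step rest

def step_bin_py (step : Option Int) : Option String :=
  match step with
  | none => none
  | some s => stepBinLoop s positionBins

-- ===== PORT B =====
def stepBinTable : List String :=
  ["step_0",
   "step_1",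
   "step_2_4", "step_2_4", "step_2_4",
   "step_5_9", "step_5_9", "step_5_9", "step_5_9", "step_5_9",
   "step_5_plus"]

-- _STEP_BIN_TABLE[min(step, 10)]: in-range tuple indexing → PySem.List.pyGet? (always some here)
def step_bin_py_alt (step : Option Int) : Option String :=
  match step with
  | none => none
  | some s =>
      if s < 0 then none
      else PySem.List.pyGet? stepBinTable (min s 10)

-- ===== PRECONDITION & SPEC =====
def Spec_step_bin_py (step : Option Int) (out : Option String) : Prop := out = step_bin_py_alt step
instance (step : Option Int) (out : Option String) : Decidable (Spec_step_bin_py step out) := by unfold Spec_step_bin_py; infer_instance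

-- ===== CLAIM (what is proved, stated in full; the proofs are below) =====
def Claim_equal_step_bin_py : Prop := ∀ (step : Option Int), Dom_step_bin_py step → Spec_step_bin_py step (step_bin_py step)

-- ===== LEMMAS AND PROOFS =====
theorem min_ten_of_ge (s : Int) (h : 10 ≤ s) : min s 10 = 10 := by omega

-- ===== VERDICT (by name: the statement is the Claim_ definition above) =====
set_option maxHeartbeats 1000000 in
theorem step_bin_py_spec : Claim_equal_step_bin_py := by
  intro step _
  unfold Spec_step_bin_py step_bin_py step_bin_py_alt
  cases step with
  | none => rfl
  | some s =>
      show stepBinLoop s positionBins =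
        if s < 0 then none else PySem.List.pyGet? stepBinTable (min s 10)
      by_cases hneg : s < 0
      · rw [if_pos hneg]
        simp only [positionBins, stepBinLoop, String.reduceBEq, Bool.false_eq_true, if_false,
          if_true, decide_eq_true_eq, Bool.and_eq_true, ge_iff_le, beq_iff_eq]
        split_ifs <;> first | rfl | omega
      · rw [if_neg hneg]
        by_cases hbig : 10 ≤ s
        · rw [min_ten_of_ge s hbig]
          simp only [positionBins, stepBinLoop, String.reduceBEq, Bool.false_eq_true, if_false,
            if_true, decide_eq_true_eq, Bool.and_eq_true, ge_iff_le, beq_iff_eq]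
          split_ifs <;> first | rfl | omega
        · have h0 : 0 ≤ s := by omega
          have h9 : s ≤ 9 := by omega
          interval_cases s <;> decide
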